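-- pv_equiv track=rewrite | github.com/antigenomics/mirpy | mir/resources/segments/build_gene_library.py | _format_stats_block
-- ===== SOURCE A (Python) =====
-- from collections import defaultdict
--
-- Row = tuple[str, str, str, str, str]  # (species, locus, gene, allele, sequence)
--
-- def compute_stats(
--     rows: list[Row],
-- ) -> tuple[dict[tuple[str, str, str], int], dict[tuple[str, str, str], int]]:
--     """Compute allele counts per (species, locus, gene).
--
--     Args:
--         rows: Gene-library rows.
--
--     Returns:
--         Tuple ``(total, major)`` where both are dicts keyed by
--         ``(species, locus, gene)``.  *total* counts all alleles; *major*
--         counts only those whose allele name ends with ``*01``.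
--     """
--     total: dict[tuple[str, str, str], int] = defaultdict(int)
--     major: dict[tuple[str, str, str], int] = defaultdict(int)
--     for species, locus, gene, allele, _ in rows:
--         key = (species, locus, gene)
--         total[key] += 1
--         if allele.endswith("*01"):
--             major[key] += 1
--     return total, major
--
-- def _format_stats_block(rows: list[Row]) -> str:
--     """Return a fixed-width allele-count table string."""
--     total, major = compute_stats(rows)
--     col = (10, 8, 6, 12, 14)
--     lines = [
--         (
--             f"{'species':<{col[0]}}"
--             f"{'locus':<{col[1]}}"
--             f"{'gene':<{col[2]}}"
--             f"{'alleles':>{col[3]}}"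
--             f"{'major (*01)':>{col[4]}}"
--         ),
--         "-" * sum(col),
--     ]
--     for key in sorted(total):
--         s, l, g = key
--         lines.append(
--             f"{s:<{col[0]}}{l:<{col[1]}}{g:<{col[2]}}"
--             f"{total[key]:>{col[3]}}{major[key]:>{col[4]}}"
--         )
--     lines.append("-" * sum(col))
--     lines.append(
--         f"{'TOTAL':<{col[0]+col[1]+col[2]}}"
--         f"{sum(total.values()):>{col[3]}}"
--         f"{sum(major.values()):>{col[4]}}"
--     )
--     return "\n".join(lines)
-- ===== SOURCE B (Python) =====
-- def _format_stats_block(rows):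
--     """Return a fixed-width allele-count table string."""
--     col = (10, 8, 6, 12, 14)
--     sep = "-" * sum(col)
--     header = (
--         f"{'species':<{col[0]}}{'locus':<{col[1]}}{'gene':<{col[2]}}"
--         f"{'alleles':>{col[3]}}{'major (*01)':>{col[4]}}"
--     )
--     pairs = sorted(((s, l, g), a.endswith("*01")) for s, l, g, a, _ in rows)
--     groups = []  # [(key, total, majors)] in sorted key order
--     for key, flag in pairs:
--         if groups and groups[-1][0] == key:
--             k, t, m = groups[-1]
--             groups[-1] = (k, t + 1, m + flag)
--         else:
--             groups.append((key, 1, int(flag)))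
--     body = [
--         f"{s:<{col[0]}}{l:<{col[1]}}{g:<{col[2]}}{t:>{col[3]}}{m:>{col[4]}}"
--         for (s, l, g), t, m in groups
--     ]
--     footer = (
--         f"{'TOTAL':<{col[0] + col[1] + col[2]}}"
--         f"{sum(t for _, t, _ in groups):>{col[3]}}"
--         f"{sum(m for _, _, m in groups):>{col[4]}}"
--     )
--     return "\n".join([header, sep, *body, sep, footer])
-- ===== Notes on version B (the rewrite author's own statement) =====
-- stated objective: alternative
-- what changed: B drops the two defaultdict aggregations and the values() sums: it sorts the (key, is-major) pairs once and folds them in a single grouped scan that extends or opens the current group, taking the grand totals from the per-group sums.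
import Mathlib
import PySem

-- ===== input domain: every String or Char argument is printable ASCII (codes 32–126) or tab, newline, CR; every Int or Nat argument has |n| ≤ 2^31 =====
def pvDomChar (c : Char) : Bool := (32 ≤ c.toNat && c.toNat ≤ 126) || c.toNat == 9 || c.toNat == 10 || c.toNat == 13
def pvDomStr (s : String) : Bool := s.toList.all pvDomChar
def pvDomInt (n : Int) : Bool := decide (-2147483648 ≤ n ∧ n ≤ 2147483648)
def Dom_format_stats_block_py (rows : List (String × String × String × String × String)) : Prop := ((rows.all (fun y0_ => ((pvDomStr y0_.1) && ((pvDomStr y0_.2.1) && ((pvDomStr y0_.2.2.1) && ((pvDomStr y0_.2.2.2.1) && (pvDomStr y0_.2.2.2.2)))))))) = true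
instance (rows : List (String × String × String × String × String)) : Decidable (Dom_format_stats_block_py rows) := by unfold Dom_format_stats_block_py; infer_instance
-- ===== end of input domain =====

-- B replaces A's two defaultdict aggregations + key sort by sort-then-grouped-scan: it sorts the
-- (key, is-major) pairs once and folds them into per-group (key, total, majors) triples, the
-- grand totals being the group sums (objective: alternative).

-- ----- helpers shared by both ports (the port of Python's '<' on tuples of strings, the row key) -----

-- Python's 's1 < s2' on strings: lexicographic by code point (exact; hand-written because
-- PySem has no tuple-of-strings sort key).
def pvStrLt : List Char → List Char → Bool
  | [], [] => false
  | [], _ :: _ => true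
  | _ :: _, [] => false
  | x :: xs, y :: ys =>
    if x.toNat < y.toNat then true
    else if y.toNat < x.toNat then false
    else pvStrLt xs ys

-- Python's '<' on the 3-tuples of strings (species, locus, gene): lexicographic.
def pvLexLt (a b : List Char × List Char × List Char) : Bool :=
  pvStrLt a.1 b.1 ||
    (a.1 == b.1 && (pvStrLt a.2.1 b.2.1 || (a.2.1 == b.2.1 && pvStrLt a.2.2 b.2.2)))

-- key = (species, locus, gene), as char lists
def pvKeyOf (r : String × String × String × String × String) :
    List Char × List Char × List Char :=
  (r.1.toList, r.2.1.toList, r.2.2.1.toList)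

-- ----- A-side helpers -----

-- builtin sorted(·) on key triples: the insertion sort PySem.List.sorted itself uses
-- (PySem.List.sorted_eq_foldl_insertBy), with the hand lex comparison above; exact for
-- Python's sorted on tuples of strings.
def pvSortKeys (xs : List (List Char × List Char × List Char)) :
    List (List Char × List Char × List Char) :=
  xs.foldl (fun acc x => PySem.List.insertBy pvLexLt x acc) []

-- f"{s:<w}" / f"{s:>w}" (no truncation, pad with spaces)
def pvLjust (cs : List Char) (w : Nat) : List Char := cs ++ List.replicate (w - cs.length) ' '
def pvRjust (cs : List Char) (w : Nat) : List Char := List.replicate (w - cs.length) ' ' ++ cs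

def pvHeader : String :=
  String.ofList (pvLjust "species".toList 10 ++ pvLjust "locus".toList 8 ++ pvLjust "gene".toList 6 ++
    pvRjust "alleles".toList 12 ++ pvRjust "major (*01)".toList 14)

def pvDashes : String := String.ofList (List.replicate 50 '-')

def pvRowLine (k : List Char × List Char × List Char) (t m : Int) : String :=
  String.ofList (pvLjust k.1 10 ++ pvLjust k.2.1 8 ++ pvLjust k.2.2 6 ++
    pvRjust (PySem.Int.toChars t) 12 ++ pvRjust (PySem.Int.toChars m) 14)

def pvTotalLine (t m : Int) : String :=
  String.ofList (pvLjust "TOTAL".toList 24 ++ pvRjust (PySem.Int.toChars t) 12 ++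
    pvRjust (PySem.Int.toChars m) 14)

-- ===== PORT A =====
-- compute_stats: one pass building the two defaultdicts, then the sorted-key loop.
-- 'major[key]' in the loop is a defaultdict read: it yields major.get(key, 0) and inserts the
-- default where missing — modeled exactly as getD followed by modify with the identity.
def format_stats_block_py (rows : List (String × String × String × String × String)) : String :=
  let tm := rows.foldl
    (fun (tm : PySem.Dict (List Char × List Char × List Char) Int ×
               PySem.Dict (List Char × List Char × List Char) Int) r =>
      (tm.1.modify (pvKeyOf r) 0 (· + 1),
       if PySem.Str.endswith r.2.2.2.1 "*01" then tm.2.modify (pvKeyOf r) 0 (· + 1) else tm.2))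
    (PySem.Dict.empty, PySem.Dict.empty)
  let res := (pvSortKeys tm.1.keys).foldl
    (fun (st : List String × PySem.Dict (List Char × List Char × List Char) Int) k =>
      (st.1 ++ [pvRowLine k (tm.1.getD k 0) (st.2.getD k 0)], st.2.modify k 0 (fun x => x)))
    ([pvHeader, pvDashes], tm.2)
  PySem.Str.join "\n" (res.1 ++ [pvDashes, pvTotalLine tm.1.values.sum res.2.values.sum])

-- ===== PORT B =====
-- B-side helpers: the pair comparison sorted(...) uses on ((s, l, g), bool) tuples,
-- the insertion-sort port of that builtin sorted, one grouped-scan step, and the cell formatter.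

-- Python's '<' on ((s, l, g), bool): key triple first, then False < True.
def pvPairLt (p q : (List Char × List Char × List Char) × Bool) : Bool :=
  pvLexLt p.1 q.1 || (p.1 == q.1 && (!p.2 && q.2))

-- builtin sorted(·) on the pair tuples (same insertion-sort shape as PySem.List.sorted).
def pvSortPairs (xs : List ((List Char × List Char × List Char) × Bool)) :
    List ((List Char × List Char × List Char) × Bool) :=
  xs.foldl (fun acc x => PySem.List.insertBy pvPairLt x acc) []

-- one f-string field: f"{s:>w}" (right = true) or f"{s:<w}" (right = false)
def pvCell (right : Bool) (w : Nat) (cs : List Char) : List Char :=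
  if right then List.replicate (w - cs.length) ' ' ++ cs
  else cs ++ List.replicate (w - cs.length) ' '

-- the body of Source B's for loop: extend the last group or open a new one
def pvGroupStep (gs : List ((List Char × List Char × List Char) × Int × Int))
    (p : (List Char × List Char × List Char) × Bool) :
    List ((List Char × List Char × List Char) × Int × Int) :=
  match gs.getLast? with
  | some (k, t, m) =>
    if k == p.1 then gs.dropLast ++ [(k, t + 1, m + (if p.2 then (1 : Int) else 0))]
    else gs ++ [(p.1, 1, if p.2 then (1 : Int) else 0)]
  | none => [(p.1, 1, if p.2 then (1 : Int) else 0)]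

def pvGroupRow (g : (List Char × List Char × List Char) × Int × Int) : String :=
  String.ofList (pvCell false 10 g.1.1 ++ pvCell false 8 g.1.2.1 ++ pvCell false 6 g.1.2.2 ++
    pvCell true 12 (PySem.Int.toChars g.2.1) ++ pvCell true 14 (PySem.Int.toChars g.2.2))

def format_stats_block_py_alt (rows : List (String × String × String × String × String)) : String :=
  let pairs := pvSortPairs (rows.map (fun r => (pvKeyOf r, PySem.Str.endswith r.2.2.2.1 "*01")))
  let groups := pairs.foldl pvGroupStep []
  PySem.Str.join "\n"
    ([String.ofList (pvCell false 10 "species".toList ++ pvCell false 8 "locus".toList ++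
        pvCell false 6 "gene".toList ++ pvCell true 12 "alleles".toList ++
        pvCell true 14 "major (*01)".toList),
      String.ofList (List.replicate 50 '-')] ++
      groups.map pvGroupRow ++
      [String.ofList (List.replicate 50 '-'),
       String.ofList (pvCell false 24 "TOTAL".toList ++
         pvCell true 12 (PySem.Int.toChars (groups.map (fun g => g.2.1)).sum) ++
         pvCell true 14 (PySem.Int.toChars (groups.map (fun g => g.2.2)).sum))])

-- ===== PRECONDITION & SPEC =====
def Spec_format_stats_block_py (rows : List (String × String × String × String × String)) (out : String) : Prop := out = format_stats_block_py_alt rows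
instance (rows : List (String × String × String × String × String)) (out : String) : Decidable (Spec_format_stats_block_py rows out) := by unfold Spec_format_stats_block_py; infer_instance

-- ===== CLAIM (what is proved, stated in full; the proofs are below) =====
def Claim_equal_format_stats_block_py : Prop := ∀ (rows : List (String × String × String × String × String)), Dom_format_stats_block_py rows → Spec_format_stats_block_py rows (format_stats_block_py rows)

-- ===== LEMMAS AND PROOFS =====

abbrev PvKey := List Char × List Char × List Char
abbrev PvD := PySem.Dict PvKey Int

-- ----- order facts for the hand lex comparisons -----

lemma pvStrLt_irrefl (a : List Char) : pvStrLt a a = false := by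
  induction a with
  | nil => rfl
  | cons x xs ih => simp [pvStrLt, ih]

lemma pvStrLt_trans (a b c : List Char) (h1 : pvStrLt a b = true) (h2 : pvStrLt b c = true) :
    pvStrLt a c = true := by
  induction a generalizing b c with
  | nil =>
    cases b with
    | nil => simp [pvStrLt] at h1
    | cons y ys => cases c with
      | nil => simp [pvStrLt] at h2
      | cons z zs => simp [pvStrLt]
  | cons x xs ih =>
    cases b with
    | nil => simp [pvStrLt] at h1
    | cons y ys =>
      cases c with
      | nil => simp [pvStrLt] at h2
      | cons z zs =>
        simp only [pvStrLt] at h1 h2 ⊢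
        split_ifs at h1 h2 ⊢ <;> try omega
        all_goals simp_all
        · exact ih ys zs h1 h2

lemma pvStrLt_conn (a b : List Char) (h1 : pvStrLt a b = false) (h2 : pvStrLt b a = false) :
    a = b := by
  induction a generalizing b with
  | nil => cases b with
    | nil => rfl
    | cons y ys => simp [pvStrLt] at h1
  | cons x xs ih =>
    cases b with
    | nil => simp [pvStrLt] at h2
    | cons y ys =>
      simp only [pvStrLt] at h1 h2
      split_ifs at h1 h2 <;> try omega
      have hn : x.toNat = y.toNat := by omega
      have hx : x = y := Char.ext (UInt32.toNat_inj.mp hn)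
      rw [hx, ih ys h1 h2]

lemma pvLexLt_irrefl (a : PvKey) : pvLexLt a a = false := by
  simp [pvLexLt, pvStrLt_irrefl]

lemma pvLexLt_trans (a b c : PvKey) (h1 : pvLexLt a b = true) (h2 : pvLexLt b c = true) :
    pvLexLt a c = true := by
  simp only [pvLexLt, Bool.or_eq_true, Bool.and_eq_true, beq_iff_eq] at h1 h2 ⊢
  rcases h1 with h1 | ⟨e1, h1⟩
  · rcases h2 with h2 | ⟨e2, h2⟩
    · exact Or.inl (pvStrLt_trans _ _ _ h1 h2)
    · exact Or.inl (e2 ▸ h1)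
  · rcases h2 with h2 | ⟨e2, h2⟩
    · exact Or.inl (e1 ▸ h2)
    · refine Or.inr ⟨e1.trans e2, ?_⟩
      rcases h1 with h1 | ⟨f1, h1⟩ <;> rcases h2 with h2 | ⟨f2, h2⟩
      · exact Or.inl (pvStrLt_trans _ _ _ h1 h2)
      · exact Or.inl (f2 ▸ h1)
      · exact Or.inl (f1 ▸ h2)
      · exact Or.inr ⟨f1.trans f2, pvStrLt_trans _ _ _ h1 h2⟩

lemma pvLexLt_conn (a b : PvKey) (h1 : pvLexLt a b = false) (h2 : pvLexLt b a = false) :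
    a = b := by
  simp only [pvLexLt, Bool.or_eq_false_iff, Bool.and_eq_false_iff, beq_eq_false_iff_ne,
    ne_eq] at h1 h2
  obtain ⟨ha1, hb1⟩ := h1
  obtain ⟨ha2, hb2⟩ := h2
  have e1 : a.1 = b.1 := pvStrLt_conn _ _ ha1 ha2
  rcases hb1 with hb1 | hb1
  · exact absurd e1 hb1
  rcases hb2 with hb2 | hb2
  · exact absurd e1.symm hb2
  have e2 : a.2.1 = b.2.1 := pvStrLt_conn _ _ hb1.1 hb2.1
  rcases hb1.2 with hd1 | hd1
  · exact absurd e2 hd1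
  rcases hb2.2 with hd2 | hd2
  · exact absurd e2.symm hd2
  have e3 : a.2.2 = b.2.2 := pvStrLt_conn _ _ hd1 hd2
  obtain ⟨a1, a2, a3⟩ := a
  obtain ⟨b1, b2, b3⟩ := b
  simp_all

lemma pvPairLt_irrefl (a : PvKey × Bool) : pvPairLt a a = false := by
  simp [pvPairLt, pvLexLt_irrefl]

lemma pvPairLt_trans (a b c : PvKey × Bool) (h1 : pvPairLt a b = true) (h2 : pvPairLt b c = true) :
    pvPairLt a c = true := by
  simp only [pvPairLt, Bool.or_eq_true, Bool.and_eq_true, beq_iff_eq] at h1 h2 ⊢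
  rcases h1 with h1 | ⟨e1, h1⟩ <;> rcases h2 with h2 | ⟨e2, h2⟩
  · exact Or.inl (pvLexLt_trans _ _ _ h1 h2)
  · exact Or.inl (e2 ▸ h1)
  · exact Or.inl (e1 ▸ h2)
  · refine Or.inr ⟨e1.trans e2, ?_⟩
    revert h1 h2
    cases a.2 <;> cases b.2 <;> cases c.2 <;> simp

lemma pv_insertBy_perm {α : Type} (lt : α → α → Bool) (x : α) (ys : List α) :
    (PySem.List.insertBy lt x ys).Perm (x :: ys) := by
  induction ys with
  | nil => simp [PySem.List.insertBy]
  | cons y ys ih =>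
    rw [PySem.List.insertBy]
    split
    · exact List.Perm.refl _
    · exact (ih.cons y).trans (List.Perm.swap x y ys)

lemma pv_foldl_insertBy_perm {α : Type} (lt : α → α → Bool) (xs acc : List α) :
    (xs.foldl (fun a x => PySem.List.insertBy lt x a) acc).Perm (acc ++ xs) := by
  induction xs generalizing acc with
  | nil => simp
  | cons x xs ih =>
    rw [List.foldl_cons]
    refine (ih _).trans ?_
    have h1 : (PySem.List.insertBy lt x acc).Perm (x :: acc) := pv_insertBy_perm lt x acc
    refine (h1.append_right xs).trans ?_
    have : (x :: acc ++ xs).Perm (acc ++ x :: xs) := by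
      simpa using (List.perm_middle (a := x) (l₁ := acc) (l₂ := xs)).symm
    exact this

lemma pv_insertBy_pairwise {α : Type} (lt : α → α → Bool)
    (htrans : ∀ a b c, lt a b = true → lt b c = true → lt a c = true)
    (hirr : ∀ a, lt a a = false)
    (x : α) (ys : List α) (h : ys.Pairwise (fun a b => lt b a = false)) :
    (PySem.List.insertBy lt x ys).Pairwise (fun a b => lt b a = false) := by
  have hasym : ∀ a b, lt a b = true → lt b a = false := by
    intro a b hab
    by_contra hc
    have hba : lt b a = true := by revert hc; cases lt b a <;> simp
    have := htrans a b a hab hba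
    rw [hirr] at this; exact absurd this (by simp)
  induction ys with
  | nil => simp [PySem.List.insertBy]
  | cons y ys ih =>
    rw [PySem.List.insertBy]
    rcases List.pairwise_cons.mp h with ⟨hy, hys⟩
    split
    · rename_i hxy
      refine List.pairwise_cons.mpr ⟨?_, h⟩
      intro z hz
      rcases hz with _ | hz
      · exact hasym x y hxy
      · rename_i hz
        by_contra hc
        have hzx : lt z x = true := by revert hc; cases lt z x <;> simp
        have hzy : lt z y = true := htrans z x y hzx hxy
        rw [hy z hz] at hzy; exact absurd hzy (by simp)
    · rename_i hxy
      refine List.pairwise_cons.mpr ⟨?_, ih hys⟩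
      intro z hz
      rcases (PySem.List.mem_insertBy (before := lt) (x := x) (ys := ys) (y := z)).mp hz with hz | hz
      · subst hz; revert hxy; cases lt z y <;> simp
      · exact hy z hz

lemma pv_foldl_insertBy_pairwise {α : Type} (lt : α → α → Bool)
    (htrans : ∀ a b c, lt a b = true → lt b c = true → lt a c = true)
    (hirr : ∀ a, lt a a = false)
    (xs acc : List α) (h : acc.Pairwise (fun a b => lt b a = false)) :
    (xs.foldl (fun a x => PySem.List.insertBy lt x a) acc).Pairwise (fun a b => lt b a = false) := by
  induction xs generalizing acc with
  | nil => exact h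
  | cons x xs ih =>
    rw [List.foldl_cons]
    exact ih _ (pv_insertBy_pairwise lt htrans hirr x acc h)

lemma pv_ofList_sublist {α : Type} [BEq α] [LawfulBEq α] (l : List α) :
    (PySem.Set.ofList l).Sublist l := by
  induction l using List.reverseRecOn with
  | nil => simp [PySem.Set.ofList]
  | append_singleton l x ih =>
    rw [PySem.Set.ofList_append_singleton, PySem.Set.add_eq_ite]
    split
    · exact ih.trans (List.sublist_append_left l [x])
    · exact ih.append (List.Sublist.refl [x])

lemma pv_cnt_ne (S : List (PvKey × Bool)) (p : PvKey × Bool) (k : PvKey) (hk : k ≠ p.1) :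
    ((S ++ [p]).map (·.1)).count k = (S.map (·.1)).count k ∧
    (((S ++ [p]).filter (·.2)).map (·.1)).count k = ((S.filter (·.2)).map (·.1)).count k := by
  have hb : (p.1 == k) = false := beq_eq_false_iff_ne.mpr (fun e => hk e.symm)
  constructor
  · simp [List.count_append, List.count_singleton, hb]
  · rw [List.filter_append, List.filter_cons, List.filter_nil, List.map_append,
      List.count_append]
    cases hp : p.2 <;> simp [List.count_singleton, hb]

lemma pv_cnt_self (S : List (PvKey × Bool)) (p : PvKey × Bool) :
    (((S ++ [p]).map (·.1)).count p.1 : Int) = ((S.map (·.1)).count p.1 : Int) + 1 ∧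
    ((((S ++ [p]).filter (·.2)).map (·.1)).count p.1 : Int)
      = (((S.filter (·.2)).map (·.1)).count p.1 : Int) + (if p.2 then (1 : Int) else 0) := by
  constructor
  · simp [List.count_append, List.count_singleton]
  · rw [List.filter_append, List.filter_cons, List.filter_nil, List.map_append,
      List.count_append]
    cases hp : p.2 <;> simp [List.count_singleton]

lemma pv_groups_spec (S : List (PvKey × Bool))
    (h : (S.map (·.1)).Pairwise (fun a b => pvLexLt b a = false)) :
    S.foldl pvGroupStep []
      = (PySem.Set.ofList (S.map (·.1))).map
          (fun k => (k, ((S.map (·.1)).count k : Int),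
                        (((S.filter (·.2)).map (·.1)).count k : Int))) := by
  induction S using List.reverseRecOn with
  | nil => rfl
  | append_singleton S p ih =>
    rw [List.map_append] at h
    rcases List.pairwise_append.mp h with ⟨hS, -, hcross⟩
    have hlast : ∀ k ∈ S.map (·.1), pvLexLt p.1 k = false := by
      intro k hk
      exact hcross k hk p.1 (by simp)
    have hDpw : (PySem.Set.ofList (S.map (·.1))).Pairwise (fun a b => pvLexLt b a = false) :=
      List.Pairwise.sublist (pv_ofList_sublist _) hS
    have hDnd : (PySem.Set.ofList (S.map (·.1))).Nodup := PySem.Set.nodup_ofList _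
    have hsub : ∀ k ∈ PySem.Set.ofList (S.map (·.1)), k ∈ S.map (·.1) := by
      intro k hk; exact (PySem.Set.mem_ofList _ _).mp hk
    set D := PySem.Set.ofList (S.map (·.1)) with hDdef
    rw [List.foldl_append, List.foldl_cons, List.foldl_nil, ih hS]
    by_cases hmem : p.1 ∈ S.map (·.1)
    · -- the new pair extends the last group
      have hDne : D ≠ [] := by
        intro hnil
        have : p.1 ∈ D := (PySem.Set.mem_ofList _ _).mpr hmem
        rw [hnil] at this; exact absurd this (by simp)
      have hgl : D.getLast hDne = p.1 := by
        have hmemD : p.1 ∈ D := (PySem.Set.mem_ofList _ _).mpr hmem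
        rcases (List.mem_append.mp ((List.dropLast_append_getLast hDne) ▸ hmemD)) with hin | hin
        · -- p.1 strictly earlier: order forces equality with the last
          have h1 : pvLexLt (D.getLast hDne) p.1 = false := by
            have := (List.dropLast_append_getLast hDne) ▸ hDpw
            rcases List.pairwise_append.mp this with ⟨-, -, hc⟩
            exact hc p.1 hin (D.getLast hDne) (by simp)
          have h2 : pvLexLt p.1 (D.getLast hDne) = false :=
            hlast _ (hsub _ (List.getLast_mem hDne))
          exact (pvLexLt_conn _ _ h1 h2)
        · have : p.1 = D.getLast hDne := by simpa using hin
          exact this.symm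
      -- reduce the step to dropLast ++ [updated last]
      have hgl? : D.getLast? = some p.1 := by
        rw [List.getLast?_eq_getLast hDne, hgl]
      have hglm : (D.map (fun k => (k, ((S.map (·.1)).count k : Int),
          (((S.filter (·.2)).map (·.1)).count k : Int)))).getLast?
          = some (p.1, ((S.map (·.1)).count p.1 : Int),
              (((S.filter (·.2)).map (·.1)).count p.1 : Int)) := by
        rw [List.getLast?_map, hgl?]; rfl
      rw [pvGroupStep, hglm]
      simp only [beq_self_eq_true, if_true]
      have hD2 : D = D.dropLast ++ [p.1] := by
        conv_lhs => rw [← List.dropLast_append_getLast hDne, hgl]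
      have hnotd : p.1 ∉ D.dropLast := by
        intro hin
        have := hD2 ▸ hDnd
        rcases List.nodup_append.mp this with ⟨-, -, hdisj⟩
        exact hdisj p.1 hin p.1 (by simp) rfl
      have hadd : PySem.Set.ofList ((S ++ [p]).map (·.1)) = D := by
        rw [List.map_append, List.map_cons, List.map_nil, PySem.Set.ofList_append_singleton,
          ← hDdef, PySem.Set.add_eq_ite, if_pos ((PySem.Set.mem_ofList _ _).mpr hmem)]
      rw [hadd]
      conv_rhs => rw [hD2, List.map_append]
      rw [← List.map_dropLast]
      congr 1
      · apply List.map_congr_left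
        intro k hk
        have hkne : k ≠ p.1 := fun e => hnotd (e ▸ hk)
        obtain ⟨c1, c2⟩ := pv_cnt_ne S p k hkne
        rw [c1, c2]
      · obtain ⟨c1, c2⟩ := pv_cnt_self S p
        simp only [List.map_cons, List.map_nil]
        rw [c1, c2]
    · rcases hDgl : D.getLast? with - | kl
      · -- no groups yet: S is empty
        have hDnil : D = [] := by
          cases hDl : D with
          | nil => rfl
          | cons d ds => rw [hDl] at hDgl; simp [List.getLast?_eq_getLast] at hDgl
        have hSnil : S = [] := by
          cases hSl : S with
          | nil => rfl
          | cons r rs =>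
            exfalso
            have : r.1 ∈ D := (PySem.Set.mem_ofList _ _).mpr (by rw [hSl]; simp)
            rw [hDnil] at this; exact absurd this (by simp)
        subst hSnil
        rw [pvGroupStep]
        simp only [List.getLast?_map]
        rw [show D.getLast? = none from hDgl]
        simp only [Option.map_none, List.nil_append]
        cases hp : p.2 <;>
          simp [PySem.Set.ofList, PySem.Set.add, PySem.Set.contains, List.count_singleton,
            List.filter_cons, hp]
      · -- a different last group: append a fresh one
        have hklD : kl ∈ D := by
          rcases List.getLast?_eq_some_iff.mp hDgl with ⟨ys, hys⟩
          rw [hys]; simp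
        have hklne : (kl == p.1) = false :=
          beq_eq_false_iff_ne.mpr (fun e => hmem (hsub _ (e ▸ hklD)))
        have hglm : (D.map (fun k => (k, ((S.map (·.1)).count k : Int),
            (((S.filter (·.2)).map (·.1)).count k : Int)))).getLast?
            = some (kl, ((S.map (·.1)).count kl : Int),
                (((S.filter (·.2)).map (·.1)).count kl : Int)) := by
          rw [List.getLast?_map, hDgl]; rfl
        rw [pvGroupStep, hglm]
        simp only [hklne, Bool.false_eq_true, if_false]
        have hadd : PySem.Set.ofList ((S ++ [p]).map (·.1)) = D ++ [p.1] := by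
          rw [List.map_append, List.map_cons, List.map_nil, PySem.Set.ofList_append_singleton,
            ← hDdef, PySem.Set.add_eq_ite, if_neg (fun hm => hmem (hsub _ hm))]
        rw [hadd, List.map_append]
        congr 1
        · apply List.map_congr_left
          intro k hk
          have hkne : k ≠ p.1 := fun e => hmem (hsub _ (e ▸ hk))
          obtain ⟨c1, c2⟩ := pv_cnt_ne S p k hkne
          rw [c1, c2]
        · have c1 : (((S ++ [p]).map (·.1)).count p.1 : Int) = 1 := by
            rw [List.map_append, List.map_cons, List.map_nil, List.count_append,
              List.count_eq_zero.mpr hmem]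
            simp
          have c2 : ((((S ++ [p]).filter (·.2)).map (·.1)).count p.1 : Int)
              = (if p.2 then (1 : Int) else 0) := by
            rw [List.filter_append, List.filter_cons, List.filter_nil, List.map_append,
              List.count_append]
            have h0 : ((S.filter (·.2)).map (·.1)).count p.1 = 0 := by
              rw [List.count_eq_zero]
              intro hm
              rcases List.mem_map.mp hm with ⟨q, hq, hq1⟩
              exact hmem (List.mem_map.mpr ⟨q, List.mem_of_mem_filter hq, hq1⟩)
            rw [h0]
            cases hp : p.2 <;> simp [hp, List.count_singleton]
          simp only [List.map_cons, List.map_nil]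
          rw [c1, c2]

lemma pv_sum_indicator (x : PvKey) (D : List PvKey) (hD : D.Nodup) (hx : x ∈ D) :
    (D.map (fun k => if x = k then (1 : Int) else 0)).sum = 1 := by
  induction D with
  | nil => exact absurd hx (by simp)
  | cons d D ih =>
    rcases List.nodup_cons.mp hD with ⟨hd, hD'⟩
    rcases List.mem_cons.mp hx with hx | hx
    · subst hx
      have hz : (D.map (fun k => if x = k then (1 : Int) else 0)).sum = 0 := by
        apply List.sum_eq_zero
        intro v hv
        rcases List.mem_map.mp hv with ⟨k, hk, hk2⟩
        rw [← hk2, if_neg (by rintro rfl; exact hd hk)]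
      simp [hz]
    · have hne : x ≠ d := fun e => hd (e ▸ hx)
      have : (if x = d then (1 : Int) else 0) = 0 := if_neg hne
      simp [this, ih hD' hx]

lemma pv_sum_counts_super (l D : List PvKey) (hD : D.Nodup) (hsub : ∀ x ∈ l, x ∈ D) :
    (D.map (fun k => ((l.count k : Nat) : Int))).sum = (l.length : Int) := by
  induction l with
  | nil => simp
  | cons x l ih =>
    have hx : x ∈ D := hsub x (by simp)
    have hsub' : ∀ y ∈ l, y ∈ D := fun y hy => hsub y (by simp [hy])
    have hsplit : (D.map (fun k => (((x :: l).count k : Nat) : Int)))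
        = D.map (fun k => ((l.count k : Nat) : Int) + (if x = k then (1 : Int) else 0)) := by
      apply List.map_congr_left
      intro k hk
      rw [List.count_cons]
      by_cases he : x = k
      · simp [he]
      · have : (x == k) = false := beq_eq_false_iff_ne.mpr he
        simp [this, he]
    rw [hsplit, PySem.List.sum_map_add_int, ih hsub', pv_sum_indicator x D hD hx]
    simp

-- ----- A-side reduction (counter dicts, the formatting loop) -----

lemma pv_fold_pair (rows : List (String × String × String × String × String)) (t m : PvD) :
    rows.foldl
      (fun tm r =>
        (tm.1.modify (pvKeyOf r) 0 (· + 1),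
         if PySem.Str.endswith r.2.2.2.1 "*01" then tm.2.modify (pvKeyOf r) 0 (· + 1) else tm.2))
      (t, m)
    = ((rows.map pvKeyOf).foldl (fun d k => d.modify k 0 (· + 1)) t,
       ((rows.filter (fun r => PySem.Str.endswith r.2.2.2.1 "*01")).map pvKeyOf).foldl
         (fun d k => d.modify k 0 (· + 1)) m) := by
  induction rows generalizing t m with
  | nil => rfl
  | cons r rs ih =>
    rw [List.foldl_cons, List.filter_cons]
    cases h : PySem.Str.endswith r.2.2.2.1 "*01"
    · simp only [Bool.false_eq_true, if_false, List.map_cons, List.foldl_cons, ih]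
    · simp only [if_true, List.map_cons, List.foldl_cons, ih]

lemma pv_getD_modify_id (m : PvD) (k k' : PvKey) :
    (m.modify k 0 (fun x => x)).getD k' 0 = m.getD k' 0 := by
  rw [PySem.Dict.getD_modify]
  split <;> simp_all

lemma pv_nodup_modify (m : PvD) (k : PvKey)
    (h : m.keys.Nodup) : (m.modify k 0 (fun x => x)).keys.Nodup := by
  rw [PySem.Dict.keys_modify]
  exact PySem.Dict.nodup_keys_insert _ _ _ h

-- the identity-modify of the defaultdict read never changes the values sum
lemma pv_values_sum_modify_id (m : PvD) (k : PvKey)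
    (h : m.keys.Nodup) : (m.modify k 0 (fun x => x)).values.sum = m.values.sum := by
  rw [PySem.Dict.values_eq_map_keys _ (pv_nodup_modify m k h) 0,
      PySem.Dict.values_eq_map_keys m h 0]
  simp only [pv_getD_modify_id]
  rw [PySem.Dict.keys_modify]
  cases hc : m.contains k
  · rw [PySem.Dict.keys_insert_of_not_contains _ _ hc]
    simp [PySem.Dict.getD_of_not_contains m 0 hc]
  · rw [PySem.Dict.keys_insert_of_contains _ _ hc]

-- characterisation of A's formatting loop
lemma pv_loop (tot : PvD) (ks : List PvKey) :
    ∀ (lines : List String) (m : PvD), m.keys.Nodup →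
      (ks.foldl
          (fun st k =>
            (st.1 ++ [pvRowLine k (tot.getD k 0) (st.2.getD k 0)], st.2.modify k 0 (fun x => x)))
          (lines, m)).1
        = lines ++ ks.map (fun k => pvRowLine k (tot.getD k 0) (m.getD k 0))
      ∧ (ks.foldl
          (fun st k =>
            (st.1 ++ [pvRowLine k (tot.getD k 0) (st.2.getD k 0)], st.2.modify k 0 (fun x => x)))
          (lines, m)).2.values.sum = m.values.sum := by
  induction ks with
  | nil => intro lines m _; simp
  | cons k ks ih =>
    intro lines m hm
    rw [List.foldl_cons]
    dsimp only
    obtain ⟨h1, h2⟩ := ih (lines ++ [pvRowLine k (tot.getD k 0) (m.getD k 0)])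
      (m.modify k 0 (fun x => x)) (pv_nodup_modify m k hm)
    refine ⟨?_, ?_⟩
    · rw [h1, List.map_cons]
      simp [pv_getD_modify_id, List.append_assoc]
    · rw [h2, pv_values_sum_modify_id m k hm]

-- the ambient BEq on key triples counts like the DecidableEq-derived one
-- values-sum of a counter dict is the length of the counted list
lemma pv_counter_values_sum (l : List PvKey) :
    (PySem.Dict.counter l).values.sum = (l.length : Int) := by
  have hnd : (PySem.Dict.counter l).keys.Nodup := by
    rw [PySem.Dict.keys_counter]; exact PySem.Set.nodup_ofList l
  rw [PySem.Dict.values_eq_map_keys _ hnd 0, PySem.Dict.keys_counter]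
  simp only [PySem.Dict.getD_counter]
  exact pv_sum_counts_super l _ (PySem.Set.nodup_ofList l)
    (fun x hx => (PySem.Set.mem_ofList l x).mpr hx)

-- ----- B-side formatting bridges -----

lemma pv_groupRow_eq (k : PvKey) (t m : Int) :
    pvGroupRow (k, t, m) = pvRowLine k t m := by
  simp [pvGroupRow, pvRowLine, pvCell, pvLjust, pvRjust]

-- ===== VERDICT (by name: the statement is the Claim_ definition above) =====
theorem format_stats_block_py_spec : Claim_equal_format_stats_block_py := by
  intro rows _
  show format_stats_block_py rows = format_stats_block_py_alt rows
  simp only [format_stats_block_py, format_stats_block_py_alt]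
  rw [pv_fold_pair]
  rw [← PySem.Dict.counter_eq_foldl, ← PySem.Dict.counter_eq_foldl]
  obtain ⟨h1, h2⟩ := pv_loop (PySem.Dict.counter (rows.map pvKeyOf))
    (pvSortKeys (PySem.Dict.counter (rows.map pvKeyOf)).keys) [pvHeader, pvDashes]
    (PySem.Dict.counter ((rows.filter (fun r => PySem.Str.endswith r.2.2.2.1 "*01")).map pvKeyOf))
    (by rw [PySem.Dict.keys_counter]; exact PySem.Set.nodup_ofList _)
  rw [h1, h2, PySem.Dict.keys_counter, pv_counter_values_sum, pv_counter_values_sum]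
  simp only [PySem.Dict.getD_counter]
  -- B side: the sorted pair list and its grouped scan
  set f : (String × String × String × String × String) → PvKey × Bool :=
    fun r => (pvKeyOf r, PySem.Str.endswith r.2.2.2.1 "*01") with hf
  set S := pvSortPairs (rows.map f) with hSdef
  have hSperm : S.Perm (rows.map f) := by
    have := pv_foldl_insertBy_perm pvPairLt (rows.map f) []
    simpa [pvSortPairs, hSdef] using this
  have hSpw : S.Pairwise (fun a b => pvPairLt b a = false) :=
    pv_foldl_insertBy_pairwise pvPairLt pvPairLt_trans pvPairLt_irrefl _ [] (by simp)
  have hKpw : (S.map (·.1)).Pairwise (fun a b => pvLexLt b a = false) := by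
    rw [List.pairwise_map]
    refine hSpw.imp ?_
    intro a b hab
    simp only [pvPairLt, Bool.or_eq_false_iff] at hab
    exact hab.1
  rw [pv_groups_spec S hKpw]
  -- the two key lists coincide
  have hmapfst : (rows.map f).map (·.1) = rows.map pvKeyOf := by
    rw [List.map_map]
    rfl
  have hpermK : (S.map (·.1)).Perm (rows.map pvKeyOf) := hmapfst ▸ hSperm.map (·.1)
  have hKAperm : (pvSortKeys (PySem.Set.ofList (rows.map pvKeyOf))).Perm
      (PySem.Set.ofList (S.map (·.1))) := by
    have ha : (pvSortKeys (PySem.Set.ofList (rows.map pvKeyOf))).Perm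
        (PySem.Set.ofList (rows.map pvKeyOf)) := by
      have := pv_foldl_insertBy_perm pvLexLt (PySem.Set.ofList (rows.map pvKeyOf)) []
      simpa [pvSortKeys] using this
    refine ha.trans ?_
    rw [List.perm_ext_iff_of_nodup (PySem.Set.nodup_ofList _) (PySem.Set.nodup_ofList _)]
    intro k
    rw [PySem.Set.mem_ofList, PySem.Set.mem_ofList]
    exact ⟨fun hk => hpermK.mem_iff.mpr hk, fun hk => hpermK.mem_iff.mp hk⟩
  have hKA : pvSortKeys (PySem.Set.ofList (rows.map pvKeyOf)) = PySem.Set.ofList (S.map (·.1)) := by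
    refine List.eq_of_perm_of_sorted (fun a b _ _ hab hba => pvLexLt_conn a b hba hab) ?_ ?_ hKAperm
    · have := pv_foldl_insertBy_pairwise pvLexLt pvLexLt_trans pvLexLt_irrefl
        (PySem.Set.ofList (rows.map pvKeyOf)) [] (by simp)
      simpa [pvSortKeys] using this
    · exact List.Pairwise.sublist (pv_ofList_sublist _) hKpw
  rw [← hKA]
  -- counts transfer along the permutations
  have hcnt : ∀ k : PvKey, (S.map (·.1)).count k = (rows.map pvKeyOf).count k :=
    fun k => hpermK.count_eq k
  have hfilperm : ((S.filter (·.2)).map (·.1)).Perm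
      ((rows.filter (fun r => PySem.Str.endswith r.2.2.2.1 "*01")).map pvKeyOf) := by
    have h1 : (S.filter (·.2)).Perm ((rows.map f).filter (·.2)) := hSperm.filter _
    have h2 : (rows.map f).filter (·.2)
        = (rows.filter (fun r => PySem.Str.endswith r.2.2.2.1 "*01")).map f := by
      rw [List.filter_map]
      rfl
    have := (h1.map (·.1))
    rw [h2, List.map_map] at this
    exact this
  have hmcnt : ∀ k : PvKey, ((S.filter (·.2)).map (·.1)).count k
      = ((rows.filter (fun r => PySem.Str.endswith r.2.2.2.1 "*01")).map pvKeyOf).count k :=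
    fun k => hfilperm.count_eq k
  -- nodup / membership of the shared key list
  have hKnd : (pvSortKeys (PySem.Set.ofList (rows.map pvKeyOf))).Nodup := by
    rw [hKA]; exact PySem.Set.nodup_ofList _
  have hKmem : ∀ x ∈ rows.map pvKeyOf, x ∈ pvSortKeys (PySem.Set.ofList (rows.map pvKeyOf)) := by
    intro x hx
    rw [hKA, PySem.Set.mem_ofList]
    exact hpermK.mem_iff.mpr hx
  apply congrArg (PySem.Str.join "\n")
  -- the B-side header and dashes are A's
  have hh : String.ofList (pvCell false 10 "species".toList ++ pvCell false 8 "locus".toList ++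
      pvCell false 6 "gene".toList ++ pvCell true 12 "alleles".toList ++
      pvCell true 14 "major (*01)".toList) = pvHeader := rfl
  have hdsh : String.ofList (List.replicate 50 '-') = pvDashes := rfl
  rw [hh, hdsh]
  -- body lines
  have hbody : ((pvSortKeys (PySem.Set.ofList (rows.map pvKeyOf))).map
        (fun k => (k, ((S.map (·.1)).count k : Int),
                      (((S.filter (·.2)).map (·.1)).count k : Int)))).map pvGroupRow
      = (pvSortKeys (PySem.Set.ofList (rows.map pvKeyOf))).map
        (fun k => pvRowLine k ((rows.map pvKeyOf).count k : Int)
          (((rows.filter (fun r => PySem.Str.endswith r.2.2.2.1 "*01")).map pvKeyOf).count k : Int)) := by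
    rw [List.map_map]
    apply List.map_congr_left
    intro k _
    show pvGroupRow (k, _, _) = _
    rw [pv_groupRow_eq, hcnt, hmcnt]
  rw [hbody]
  -- footer sums
  have hsum1 : (((pvSortKeys (PySem.Set.ofList (rows.map pvKeyOf))).map
        (fun k => (k, ((S.map (·.1)).count k : Int),
                      (((S.filter (·.2)).map (·.1)).count k : Int)))).map (fun g => g.2.1)).sum
      = ((rows.map pvKeyOf).length : Int) := by
    rw [List.map_map]
    have hc : ((pvSortKeys (PySem.Set.ofList (rows.map pvKeyOf))).map
          ((fun g => g.2.1) ∘ (fun k => ((k, ((S.map (·.1)).count k : Int),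
            (((S.filter (·.2)).map (·.1)).count k : Int)) : PvKey × Int × Int))))
        = (pvSortKeys (PySem.Set.ofList (rows.map pvKeyOf))).map
            (fun k => (((rows.map pvKeyOf).count k : Nat) : Int)) := by
      apply List.map_congr_left
      intro k _
      show ((S.map (·.1)).count k : Int) = _
      rw [hcnt]
    rw [hc]
    exact pv_sum_counts_super _ _ hKnd hKmem
  have hsum2 : (((pvSortKeys (PySem.Set.ofList (rows.map pvKeyOf))).map
        (fun k => (k, ((S.map (·.1)).count k : Int),
                      (((S.filter (·.2)).map (·.1)).count k : Int)))).map (fun g => g.2.2)).sum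
      = (((rows.filter (fun r => PySem.Str.endswith r.2.2.2.1 "*01")).map pvKeyOf).length : Int) := by
    rw [List.map_map]
    have hc : ((pvSortKeys (PySem.Set.ofList (rows.map pvKeyOf))).map
          ((fun g => g.2.2) ∘ (fun k => ((k, ((S.map (·.1)).count k : Int),
            (((S.filter (·.2)).map (·.1)).count k : Int)) : PvKey × Int × Int))))
        = (pvSortKeys (PySem.Set.ofList (rows.map pvKeyOf))).map
            (fun k => ((((rows.filter (fun r => PySem.Str.endswith r.2.2.2.1 "*01")).map pvKeyOf).count k : Nat) : Int)) := by
      apply List.map_congr_left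
      intro k _
      show (((S.filter (·.2)).map (·.1)).count k : Int) = _
      rw [hmcnt]
    rw [hc]
    refine pv_sum_counts_super _ _ hKnd ?_
    intro x hx
    rcases List.mem_map.mp hx with ⟨r, hr, hrx⟩
    exact hKmem x (List.mem_map.mpr ⟨r, List.mem_of_mem_filter hr, hrx⟩)
  rw [hsum1, hsum2]
  have hftr : ∀ t m : Int, String.ofList (pvCell false 24 "TOTAL".toList ++
      pvCell true 12 (PySem.Int.toChars t) ++ pvCell true 14 (PySem.Int.toChars m))
      = pvTotalLine t m := by
    intro t m
    simp [pvTotalLine, pvCell, pvLjust, pvRjust]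
  rw [hftr]
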